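-- pv_equiv track=rewrite | github.com/peterklingelhofer/generative-music | textToAudio.py | generateScaleNotes
-- ===== SOURCE A (Python) =====
-- def generateScaleNotes(root, scale_type):
--     if scale_type == 'major':
--         intervals = [2, 2, 1, 2, 2, 2, 1]
--     elif scale_type == 'minor':
--         intervals = [2, 1, 2, 2, 1, 2, 2]
--     else:
--         raise ValueError(f'Invalid scale type: {scale_type}')
--     notes = [root]
--     for interval in intervals:
--         notes.append(notes[-1] + interval)
--     return notes
-- ===== SOURCE B (Python) =====
-- _SCALE_OFFSETS = {
--     'major': [0, 2, 4, 5, 7, 9, 11, 12],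
--     'minor': [0, 2, 3, 5, 7, 8, 10, 12],
-- }
--
-- def generateScaleNotes(root, scale_type):
--     try:
--         offsets = _SCALE_OFFSETS[scale_type]
--     except KeyError:
--         raise ValueError(f'Invalid scale type: {scale_type}')
--     return [root + off for off in offsets]
-- ===== Notes on version B (the rewrite author's own statement) =====
-- stated objective: simpler
-- what changed: Replaces the running accumulator (notes[-1] + interval) with fixed absolute-offset tables and one independent map root+off.
import Mathlib
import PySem

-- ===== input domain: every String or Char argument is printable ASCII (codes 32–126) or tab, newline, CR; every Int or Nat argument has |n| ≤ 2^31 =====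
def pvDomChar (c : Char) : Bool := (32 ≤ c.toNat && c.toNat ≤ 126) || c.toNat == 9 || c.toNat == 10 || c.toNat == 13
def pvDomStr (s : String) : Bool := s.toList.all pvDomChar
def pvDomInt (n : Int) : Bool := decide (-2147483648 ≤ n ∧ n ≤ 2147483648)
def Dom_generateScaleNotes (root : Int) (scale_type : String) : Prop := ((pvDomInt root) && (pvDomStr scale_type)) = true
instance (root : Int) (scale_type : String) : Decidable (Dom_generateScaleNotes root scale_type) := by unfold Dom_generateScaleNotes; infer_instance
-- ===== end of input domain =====

-- B replaces A's running accumulator with absolute-offset tables and a single map from root (objective: simpler).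


-- ===== PORT A =====
def generateScaleNotes (root : Int) (scale_type : String) : List Int :=
  let intervals : List Int :=
    if scale_type == "major" then [2, 2, 1, 2, 2, 2, 1]
    else [2, 1, 2, 2, 1, 2, 2]  -- "minor"; other strings raise ValueError, excluded by Pre_
  (intervals.foldl (fun notes interval => notes ++ [notes.getLast! + interval]) [root])

-- ===== PORT B =====
def scaleOffsets (scale_type : String) : List Int :=
  if scale_type == "major" then [0, 2, 4, 5, 7, 9, 11, 12]
  else [0, 2, 3, 5, 7, 8, 10, 12]  -- "minor"; other strings raise ValueError, excluded by Pre_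
def generateScaleNotes_alt (root : Int) (scale_type : String) : List Int :=
  (scaleOffsets scale_type).map (fun off => root + off)

-- ===== PRECONDITION & SPEC =====
-- Pre_ excludes exactly the scale types on which A raises ValueError.
def Pre_generateScaleNotes (_root : Int) (scale_type : String) : Prop :=
  scale_type = "major" ∨ scale_type = "minor"
instance (root : Int) (scale_type : String) : Decidable (Pre_generateScaleNotes root scale_type) := by
  unfold Pre_generateScaleNotes; infer_instance
def pvWitness_generateScaleNotes : Int × String := (60, "major")
def Spec_generateScaleNotes (root : Int) (scale_type : String) (out : List Int) : Prop := out = generateScaleNotes_alt root scale_type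
instance (root : Int) (scale_type : String) (out : List Int) : Decidable (Spec_generateScaleNotes root scale_type out) := by unfold Spec_generateScaleNotes; infer_instance

-- ===== CLAIM (what is proved, stated in full; the proofs are below) =====
def Claim_equal_generateScaleNotes : Prop := ∀ (root : Int) (scale_type : String), Dom_generateScaleNotes root scale_type → Pre_generateScaleNotes root scale_type → Spec_generateScaleNotes root scale_type (generateScaleNotes root scale_type)

-- ===== LEMMAS AND PROOFS =====

-- ===== VERDICT (by name: the statement is the Claim_ definition above) =====
theorem generateScaleNotes_spec : Claim_equal_generateScaleNotes := by
  intro root scale_type _ hpre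
  rcases hpre with h | h <;> subst h <;>
    simp [Spec_generateScaleNotes, generateScaleNotes, generateScaleNotes_alt, scaleOffsets,
      List.foldl, List.getLast!] <;> refine ⟨by ring, by ring, by ring, by ring, by ring, by ring⟩
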